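-- pv_equiv track=rewrite | github.com/PanYuxn/Warehouse_Optimization4Mathercup | ss_for_model.py | get_category
-- ===== SOURCE A (Python) =====
-- def get_category(original_list):
--     # 初始化四个种类的位置列表
--     category1_indices = []
--     category2_indices = []
--     category3_indices = []
--     category4_indices = []
--
--     # 遍历原始列表并记录每个种类的索引
--     for index, item in enumerate(original_list):
--         if item == 'low':
--             category1_indices.append(index)
--         elif item == 'medium':
--             category2_indices.append(index)
--         elif item == 'high':
--             category3_indices.append(index)
--         elif item == 'veryhigh':
--             category4_indices.append(index)
--
--     return category1_indices, category2_indices, category3_indices, category4_indices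
-- ===== SOURCE B (Python) =====
-- def get_category(original_list):
--     # Four independent filtered scans, one per category label.
--     category1_indices = [i for i, x in enumerate(original_list) if x == 'low']
--     category2_indices = [i for i, x in enumerate(original_list) if x == 'medium']
--     category3_indices = [i for i, x in enumerate(original_list) if x == 'high']
--     category4_indices = [i for i, x in enumerate(original_list) if x == 'veryhigh']
--     return category1_indices, category2_indices, category3_indices, category4_indices
-- ===== Notes on version B (the rewrite author's own statement) =====
-- stated objective: alternative
-- what changed: Replaced the single branching pass with four independent filtered comprehensions over enumerate, one per category label.
import Mathlib
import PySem

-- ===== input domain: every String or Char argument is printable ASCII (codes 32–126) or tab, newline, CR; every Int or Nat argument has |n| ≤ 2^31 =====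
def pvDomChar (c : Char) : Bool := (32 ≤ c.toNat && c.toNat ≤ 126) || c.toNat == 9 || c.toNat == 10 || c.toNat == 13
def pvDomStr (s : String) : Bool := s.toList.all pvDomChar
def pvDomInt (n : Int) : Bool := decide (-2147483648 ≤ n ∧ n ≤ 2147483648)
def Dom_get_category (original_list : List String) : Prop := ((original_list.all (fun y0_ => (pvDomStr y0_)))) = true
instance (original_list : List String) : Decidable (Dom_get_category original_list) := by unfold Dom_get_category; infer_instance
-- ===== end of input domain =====

-- B groups indices with four independent filtered scans (one per label) instead of A's single branching pass; objective: alternative (same O(n) cost).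


-- ===== PORT A =====
-- the body of A's for-loop, as a step function over the 4-tuple accumulator
def gcStep (st : List Int × List Int × List Int × List Int) (p : Int × String) :
    List Int × List Int × List Int × List Int :=
  let (index, item) := p
  if item == "low" then (st.1 ++ [index], st.2.1, st.2.2.1, st.2.2.2)
  else if item == "medium" then (st.1, st.2.1 ++ [index], st.2.2.1, st.2.2.2)
  else if item == "high" then (st.1, st.2.1, st.2.2.1 ++ [index], st.2.2.2)
  else if item == "veryhigh" then (st.1, st.2.1, st.2.2.1, st.2.2.2 ++ [index])
  else st

def get_category (original_list : List String) : List Int × List Int × List Int × List Int :=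
  (PySem.List.enumerate original_list 0).foldl gcStep ([], [], [], [])

-- ===== PORT B =====
def get_category_alt (original_list : List String) : List Int × List Int × List Int × List Int :=
  let category1_indices := ((PySem.List.enumerate original_list 0).filter (fun p => p.2 == "low")).map (·.1)
  let category2_indices := ((PySem.List.enumerate original_list 0).filter (fun p => p.2 == "medium")).map (·.1)
  let category3_indices := ((PySem.List.enumerate original_list 0).filter (fun p => p.2 == "high")).map (·.1)
  let category4_indices := ((PySem.List.enumerate original_list 0).filter (fun p => p.2 == "veryhigh")).map (·.1)
  (category1_indices, category2_indices, category3_indices, category4_indices)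

-- ===== PRECONDITION & SPEC =====
def Spec_get_category (original_list : List String) (out : List Int × List Int × List Int × List Int) : Prop := out = get_category_alt original_list
instance (original_list : List String) (out : List Int × List Int × List Int × List Int) : Decidable (Spec_get_category original_list out) := by unfold Spec_get_category; infer_instance

-- ===== CLAIM (what is proved, stated in full; the proofs are below) =====
def Claim_equal_get_category : Prop := ∀ (original_list : List String), Dom_get_category original_list → Spec_get_category original_list (get_category original_list)

-- ===== LEMMAS AND PROOFS =====

lemma gc_inv (l : List (Int × String)) (a b c d : List Int) :
    l.foldl gcStep (a, b, c, d) =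
    (a ++ (l.filter (fun p => p.2 == "low")).map (·.1),
     b ++ (l.filter (fun p => p.2 == "medium")).map (·.1),
     c ++ (l.filter (fun p => p.2 == "high")).map (·.1),
     d ++ (l.filter (fun p => p.2 == "veryhigh")).map (·.1)) := by
  induction l generalizing a b c d with
  | nil => simp
  | cons p t ih =>
    obtain ⟨i, s⟩ := p
    simp only [List.foldl_cons, List.filter_cons]
    by_cases h1 : s == "low"
    · rw [show gcStep (a, b, c, d) (i, s) = (a ++ [i], b, c, d) from by simp [gcStep, h1], ih]
      simp_all
    · by_cases h2 : s == "medium"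
      · rw [show gcStep (a, b, c, d) (i, s) = (a, b ++ [i], c, d) from by simp [gcStep, h1, h2], ih]
        simp_all
      · by_cases h3 : s == "high"
        · rw [show gcStep (a, b, c, d) (i, s) = (a, b, c ++ [i], d) from by simp [gcStep, h1, h2, h3], ih]
          simp_all
        · by_cases h4 : s == "veryhigh"
          · rw [show gcStep (a, b, c, d) (i, s) = (a, b, c, d ++ [i]) from by simp [gcStep, h1, h2, h3, h4], ih]
            simp_all
          · rw [show gcStep (a, b, c, d) (i, s) = (a, b, c, d) from by simp [gcStep, h1, h2, h3, h4], ih]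
            simp_all

-- ===== VERDICT =====
theorem get_category_spec : Claim_equal_get_category := by
  intro l _
  unfold Spec_get_category get_category get_category_alt
  rw [gc_inv]
  simp
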